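-- pv_equiv track=rewrite | github.com/vvrmahendra/DS-AlgoPrac | heaps/removeEle.py | solve
-- ===== SOURCE A (Python) =====
-- def solve(A):
--     ans = 0
--     sum_ = sum(A)
--     A = [-1*i for i in A]
--     import heapq as hq
--     hq.heapify(A)
--     while A:
--         ans += sum_
--         temp = hq.heappop(A)
--         sum_ += temp
--     mod = 10**9+7
--     return ans%mod
-- ===== SOURCE B (Python) =====
-- def solve(A):
--     d = sorted(A, reverse=True)
--     ans = 0
--     for i, v in enumerate(d):
--         ans += (i + 1) * v
--     return ans % (10**9 + 7)
-- ===== Notes on version B (the rewrite author's own statement) =====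
-- stated objective: simpler
-- what changed: Replaces the negated max-heap with its repeated pop-and-decrement running-sum loop by one descending sort followed by a single indexed pass summing (i+1)*d[i], since the element of rank i contributes to exactly i+1 running sums.
import Mathlib
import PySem

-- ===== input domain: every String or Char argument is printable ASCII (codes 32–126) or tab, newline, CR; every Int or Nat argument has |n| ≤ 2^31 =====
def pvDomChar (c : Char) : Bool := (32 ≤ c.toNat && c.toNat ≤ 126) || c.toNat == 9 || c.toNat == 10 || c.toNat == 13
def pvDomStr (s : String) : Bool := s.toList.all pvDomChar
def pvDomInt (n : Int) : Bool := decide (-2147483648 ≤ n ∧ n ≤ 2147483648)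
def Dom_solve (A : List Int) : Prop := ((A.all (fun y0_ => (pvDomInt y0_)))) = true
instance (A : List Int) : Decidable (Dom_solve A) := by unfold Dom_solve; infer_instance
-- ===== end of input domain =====

-- B replaces A's negated max-heap and pop-and-decrement running-sum loop by one descending sort
-- plus a single indexed weighted sum (objective: simpler).


-- ===== PORT A =====
-- `heapq` is ported by its contract: after `heapify`, each `heappop` removes and returns the
-- current minimum of the heap's multiset — exact for the values A observes (temp, sum_, ans).
def popLoop (h : List Int) (s ans : Int) : Int :=
  match hm : h.min? with
  | none => ans
  | some m => popLoop (h.erase m) (s + m) (ans + s)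
termination_by h.length
decreasing_by
  have hmem : m ∈ h := ((List.min?_eq_some_iff).mp hm).1
  have := List.length_erase_of_mem hmem
  have : h ≠ [] := by rintro rfl; simp at hmem
  have : 0 < h.length := List.length_pos_iff.mpr this
  simp [List.length_erase_of_mem hmem]; omega

def solve (A : List Int) : Int :=
  let sum0 := A.sum
  let heap := A.map (fun i => -1 * i)
  let ans := popLoop heap sum0 0
  PySem.Int.mod ans (10 ^ 9 + 7)

-- ===== PORT B =====
def solve_alt (A : List Int) : Int :=
  let d := PySem.List.sorted A (fun x => x) true
  let ans := (PySem.List.enumerate d 0).foldl (fun acc p => acc + (p.1 + 1) * p.2) 0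
  PySem.Int.mod ans (10 ^ 9 + 7)

-- ===== PRECONDITION & SPEC =====
def Spec_solve (A : List Int) (out : Int) : Prop := out = solve_alt A
instance (A : List Int) (out : Int) : Decidable (Spec_solve A out) := by unfold Spec_solve; infer_instance

-- ===== CLAIM (what is proved, stated in full; the proofs are below) =====
def Claim_equal_solve : Prop := ∀ (A : List Int), Dom_solve A → Spec_solve A (solve A)

-- ===== LEMMAS AND PROOFS =====

-- pop order: the min-pop loop equals the same loop over the ascending-sorted list
def sortLoop : List Int → Int → Int → Int
  | [], _, ans => ans
  | x :: xs, s, ans => sortLoop xs (s + x) (ans + s)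

-- tail weights on the A side: T l = Σ_i (n-1-i) * l_i
def T : List Int → Int
  | [] => 0
  | x :: xs => (xs.length : Int) * x + T xs

-- B-side weights: U d = Σ_i (i+1) * d_i
def U : List Int → Int
  | [] => 0
  | _ :: xs => xs.sum + U xs

theorem sorted_cons_min (h : List Int) (m : Int) (hm : h.min? = some m) :
    PySem.List.sorted h (fun x => x) false =
      m :: PySem.List.sorted (h.erase m) (fun x => x) false := by
  obtain ⟨hmem, hle⟩ := (List.min?_eq_some_iff).mp hm
  apply PySem.List.sorted_id_eq_of_perm_of_pairwise
  · exact ((PySem.List.sorted_perm _ _ _).cons m).trans (List.perm_cons_erase hmem).symm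
  · refine List.pairwise_cons.mpr ⟨?_, ?_⟩
    · intro y hy
      exact hle y (List.mem_of_mem_erase ((PySem.List.mem_sorted _ _ _ _).mp hy))
    · simpa using PySem.List.sorted_pairwise (h.erase m) (fun x => x) 

theorem popLoop_eq_sortLoop (n : Nat) (h : List Int) (s ans : Int) (hn : h.length ≤ n) :
    popLoop h s ans = sortLoop (PySem.List.sorted h (fun x => x) false) s ans := by
  induction n generalizing h s ans with
  | zero =>
    have : h = [] := List.length_eq_zero_iff.mp (Nat.le_zero.mp hn)
    subst this
    simp [popLoop, sortLoop, PySem.List.sorted]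
  | succ n ih =>
    rw [popLoop]
    cases hm : h.min? with
    | none =>
      have : h = [] := List.min?_eq_none_iff.mp hm
      subst this; simp [sortLoop, PySem.List.sorted]
    | some m =>
      have hmem : m ∈ h := ((List.min?_eq_some_iff).mp hm).1
      rw [sorted_cons_min h m hm, sortLoop]
      apply ih
      have := List.length_erase_of_mem hmem
      have hpos : 0 < h.length := List.length_pos_iff.mpr (by rintro rfl; simp at hmem)
      omega

theorem sortLoop_closed (l : List Int) (s ans : Int) :
    sortLoop l s ans = ans + (l.length : Int) * s + T l := by
  induction l generalizing s ans with
  | nil => simp [sortLoop, T]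
  | cons x xs ih =>
    rw [sortLoop, ih, T]
    simp only [List.length_cons]
    push_cast
    ring

theorem enum_foldl_eq_U (d : List Int) (i acc : Int) :
    (PySem.List.enumerate d i).foldl (fun acc p => acc + (p.1 + 1) * p.2) acc
      = acc + (i + 1) * d.sum + U d := by
  induction d generalizing i acc with
  | nil => simp [PySem.List.enumerate_nil, U]
  | cons x xs ih =>
    rw [PySem.List.enumerate_cons, List.foldl_cons, ih, U, List.sum_cons]
    ring

theorem sorted_neg (A : List Int) :
    PySem.List.sorted (A.map (fun i => -1 * i)) (fun x => x) false =
      (PySem.List.sorted A (fun x => x) true).map (fun i => -1 * i) := by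
  apply PySem.List.sorted_id_eq_of_perm_of_pairwise
  · exact (PySem.List.sorted_perm A _ true).map _
  · have := PySem.List.sorted_pairwise_rev A (fun x => x) 
    exact (List.pairwise_map.mpr (this.imp (by intro a b hba; simp; omega)))

theorem weights_eq (d : List Int) :
    (d.length : Int) * d.sum + T (d.map (fun i => -1 * i)) = d.sum + U d := by
  induction d with
  | nil => simp [T, U]
  | cons x xs ih =>
    simp only [List.map_cons, T, U, List.sum_cons, List.length_cons, List.length_map]
    push_cast
    linarith [ih]

-- ===== VERDICT (by name: the statement is the Claim_ definition above) =====
theorem solve_spec : Claim_equal_solve := by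
  intro A _
  unfold Spec_solve solve solve_alt
  simp only
  congr 1
  rw [popLoop_eq_sortLoop (A.map (fun i => -1 * i)).length _ _ _ le_rfl,
      sortLoop_closed, sorted_neg, enum_foldl_eq_U]
  have hperm : (PySem.List.sorted A (fun x => x) true).Perm A := PySem.List.sorted_perm A _ true
  have hsum : (PySem.List.sorted A (fun x => x) true).sum = A.sum := hperm.sum_eq
  have hlen : (PySem.List.sorted A (fun x => x) true).length = A.length := hperm.length_eq
  rw [← hsum]
  have hw := weights_eq (PySem.List.sorted A (fun x => x) true)
  simp only [List.length_map]
  linarith [hw]
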